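-- pv_equiv track=rewrite | github.com/JacobLutin/Python_bmstu | 2_semestr/lab3.py | matrixLoop
-- ===== SOURCE A (Python) =====
-- def matrixLoop(m):
--
--     l = len(m)
--
--     prmax = 0
--     prx = 0
--     pry = 0
--
--     for i in range(l):
--         for j in range(l):
--
--             if m[i][j] == 't':
--
--                 y = i
--                 x = j
--
--                 while (x < l-1) and (m[i][x+1] == 't'):
--                     x += 1
--
--                 while (y < l-1) and (m[y+1][j] == 't'):
--                     y += 1
--
--                 x += 1
--                 y += 1
--
--                 pr = (x - j) * (y - i)
--
--                 if pr > prmax: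
--
--                     prmax = pr
--
--                     prx = j+1
--                     pry = i+1
--
--     return pry, prx
-- ===== SOURCE B (Python) =====
-- def matrixLoop(m):
--     l = len(m)
--
--     def runs(cells):
--         # suffix run-lengths of consecutive 't' in cells
--         out = []
--         r = 0
--         for c in reversed(cells):
--             r = r + 1 if c == 't' else 0
--             out.append(r)
--         out.reverse()
--         return out
--
--     rows = [row[:l] for row in m]
--     right = [runs(row) for row in rows]
--     cols = [[rows[i][j] for i in range(l)] for j in range(l)]
--     downT = [runs(col) for col in cols]
--
--     best = 0
--     px = 0
--     py = 0
--     for i in range(l):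
--         for j in range(l):
--             area = right[i][j] * downT[j][i]
--             if area > best:
--                 best = area
--                 px = j + 1
--                 py = i + 1
--     return py, px
-- ===== Notes on version B (the rewrite author's own statement) =====
-- stated objective: alternative
-- what changed: Replaced the per-'t'-cell rightward/downward while-loop rescans by two precomputed suffix run-length tables (rows and columns), making each cell's area a table product; O(n^2) table passes instead of A's worst-case O(n^3) rescans, though not measurably faster on sparse random inputs.
import Mathlib
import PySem

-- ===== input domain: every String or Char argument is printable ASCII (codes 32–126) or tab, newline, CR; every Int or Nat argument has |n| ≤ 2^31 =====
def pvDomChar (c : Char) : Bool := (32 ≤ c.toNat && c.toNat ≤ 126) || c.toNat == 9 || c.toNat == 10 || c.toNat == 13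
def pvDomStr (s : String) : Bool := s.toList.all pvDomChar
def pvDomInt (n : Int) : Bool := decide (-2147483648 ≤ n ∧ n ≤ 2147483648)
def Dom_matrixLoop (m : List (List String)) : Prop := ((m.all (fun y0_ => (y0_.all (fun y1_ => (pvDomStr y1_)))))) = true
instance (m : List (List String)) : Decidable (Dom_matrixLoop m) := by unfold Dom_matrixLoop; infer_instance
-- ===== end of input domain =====

-- B replaces A's per-cell while-loop rescans by precomputed suffix run-length tables (alternative algorithm: O(n^2) table passes instead of worst-case O(n^3) rescans).


-- ===== PORT A =====
-- m[i][j]; exact whenever the index pair is in range (guaranteed by Pre_ on every access A makes)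
def pvCell (m : List (List String)) (i j : Int) : String :=
  ((PySem.List.pyGet? ((PySem.List.pyGet? m i).getD []) j).getD "")

-- 'while (x < l-1) and (m[i][x+1] == 't'): x += 1'; the Nat argument is pure fuel
-- (the loop body runs at most (l-1-x).toNat times, so that fuel never runs out)
def pvWhileX (m : List (List String)) (l i : Int) : Nat → Int → Int
  | 0, x => x
  | n + 1, x => if x < l - 1 ∧ pvCell m i (x + 1) = "t" then pvWhileX m l i n (x + 1) else x

-- 'while (y < l-1) and (m[y+1][j] == 't'): y += 1'; same fuel discipline
def pvWhileY (m : List (List String)) (l j : Int) : Nat → Int → Int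
  | 0, y => y
  | n + 1, y => if y < l - 1 ∧ pvCell m (y + 1) j = "t" then pvWhileY m l j n (y + 1) else y

def matrixLoop (m : List (List String)) : List Int :=
  let l : Int := (m.length : Int)
  -- state (prmax, prx, pry)
  let fin := (PySem.List.pyRange 0 l 1).foldl (fun st i =>
      (PySem.List.pyRange 0 l 1).foldl (fun (st : Int × Int × Int) j =>
        if pvCell m i j = "t" then
          let x := pvWhileX m l i (l - 1 - j).toNat j + 1
          let y := pvWhileY m l j (l - 1 - i).toNat i + 1
          let pr := (x - j) * (y - i)
          if pr > st.1 then (pr, j + 1, i + 1) else st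
        else st) st) ((0 : Int), (0 : Int), (0 : Int))
  [fin.2.2, fin.2.1]

-- ===== PORT B =====
-- suffix run-lengths of consecutive "t": fold over reversed cells, append, reverse (as in Source B)
def pvRuns (cells : List String) : List Int :=
  ((cells.reverse.foldl (fun (st : Int × List Int) c =>
      let r : Int := if c = "t" then st.1 + 1 else 0
      (r, st.2 ++ [r])) ((0 : Int), ([] : List Int))).2).reverse

-- rows[i][j] / right[i][j] style indexing in Source B, in range under Pre_
def pvIdx2 {α : Type} (xss : List (List α)) (d : α) (i j : Int) : α :=
  ((PySem.List.pyGet? ((PySem.List.pyGet? xss i).getD []) j).getD d)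

def matrixLoop_alt (m : List (List String)) : List Int :=
  let l : Int := (m.length : Int)
  let rows := m.map (fun row => PySem.List.slice row none (some l))
  let right := rows.map pvRuns
  let cols := (PySem.List.pyRange 0 l 1).map (fun j =>
      (PySem.List.pyRange 0 l 1).map (fun i => pvIdx2 rows "" i j))
  let downT := cols.map pvRuns
  let fin := (PySem.List.pyRange 0 l 1).foldl (fun st i =>
      (PySem.List.pyRange 0 l 1).foldl (fun (st : Int × Int × Int) j =>
        let area := pvIdx2 right 0 i j * pvIdx2 downT 0 j i
        if area > st.1 then (area, j + 1, i + 1) else st) st)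
      ((0 : Int), (0 : Int), (0 : Int))
  [fin.2.2, fin.2.1]

-- ===== PRECONDITION & SPEC =====
-- Pre_ excludes exactly the inputs where A raises IndexError: some row shorter than len(m).
def Pre_matrixLoop (m : List (List String)) : Prop := ∀ row ∈ m, m.length ≤ row.length
instance (m : List (List String)) : Decidable (Pre_matrixLoop m) := by unfold Pre_matrixLoop; infer_instance
def pvWitness_matrixLoop : List (List String) := [["t", "x"], ["t", "t"]]

def Spec_matrixLoop (m : List (List String)) (out : List Int) : Prop := out = matrixLoop_alt m
instance (m : List (List String)) (out : List Int) : Decidable (Spec_matrixLoop m out) := by unfold Spec_matrixLoop; infer_instance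

-- ===== CLAIM (what is proved, stated in full; the proofs are below) =====
def Claim_equal_matrixLoop : Prop := ∀ (m : List (List String)), Dom_matrixLoop m → Pre_matrixLoop m → Spec_matrixLoop m (matrixLoop m)

-- ===== LEMMAS AND PROOFS =====

-- suffix run-lengths, structural form
def sRuns : List String → List Int
  | [] => []
  | c :: cs => (if c = "t" then (sRuns cs).headD 0 + 1 else 0) :: sRuns cs

theorem sRuns_length (cells : List String) : (sRuns cells).length = cells.length := by
  induction cells with
  | nil => rfl
  | cons c cs ih => simp [sRuns, ih]

theorem headD_eq_getD (l : List Int) : l.headD 0 = l.getD 0 0 := by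
  cases l <;> simp

theorem pvRuns_aux (cells : List String) (acc : List Int) :
    cells.reverse.foldl (fun (st : Int × List Int) c =>
      let r : Int := if c = "t" then st.1 + 1 else 0
      (r, st.2 ++ [r])) ((0 : Int), acc)
    = ((sRuns cells).headD 0, acc ++ (sRuns cells).reverse) := by
  induction cells generalizing acc with
  | nil => simp [sRuns]
  | cons c cs ih =>
    simp only [List.reverse_cons, List.foldl_append, ih, List.foldl_cons, List.foldl_nil, sRuns]
    split <;> simp

theorem pvRuns_eq (cells : List String) : pvRuns cells = sRuns cells := by
  unfold pvRuns
  rw [pvRuns_aux]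
  simp

theorem sRuns_getD (cells : List String) (j : Nat) (hj : j < cells.length) :
    (sRuns cells).getD j 0
      = if cells.getD j "" = "t" then (sRuns cells).getD (j + 1) 0 + 1 else 0 := by
  induction cells generalizing j with
  | nil => simp at hj
  | cons c cs ih =>
    cases j with
    | zero =>
        have h := headD_eq_getD (sRuns cs)
        simp only [List.headD_eq_head?_getD] at h
        simp [sRuns, h, List.getD]
    | succ k =>
      simp only [List.length_cons, Nat.succ_lt_succ_iff] at hj
      simp only [sRuns, List.getD_cons_succ]
      exact ih k hj

theorem sRuns_getD_out (cells : List String) (j : Nat) (hj : cells.length ≤ j) :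
    (sRuns cells).getD j 0 = 0 := by
  rw [List.getD_eq_default]
  rw [sRuns_length]; exact hj

-- fold lemmas with an invariant
theorem foldl_inv {α β : Type} (P : β → Prop) (f : β → α → β) :
    ∀ (L : List α) (b : β), P b → (∀ st a, a ∈ L → P st → P (f st a)) → P (L.foldl f b) := by
  intro L
  induction L with
  | nil => intro b hb _; exact hb
  | cons x xs ih =>
    intro b hb h
    exact ih _ (h b x (by simp) hb) (fun st a ha hst => h st a (by simp [ha]) hst)

theorem foldl_inv_congr {α β : Type} (P : β → Prop) (f g : β → α → β) :
    ∀ (L : List α) (b : β), P b → (∀ st a, a ∈ L → P st → P (f st a)) →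
      (∀ st a, a ∈ L → P st → f st a = g st a) → L.foldl f b = L.foldl g b := by
  intro L
  induction L with
  | nil => intro _ _ _ _; rfl
  | cons x xs ih =>
    intro b hb hP heq
    simp only [List.foldl_cons]
    rw [← heq b x (by simp) hb]
    exact ih _ (hP b x (by simp) hb) (fun st a ha hst => hP st a (by simp [ha]) hst)
      (fun st a ha hst => heq st a (by simp [ha]) hst)

-- row i of m truncated to len(m) (B's rows[i]); column j as B builds it
def rowC (m : List (List String)) (i : Nat) : List String := (m.getD i []).take m.length

def colC (m : List (List String)) (k : Nat) : List String :=
  (PySem.List.pyRange 0 (m.length : Int) 1).map (fun y =>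
    pvIdx2 (m.map (fun row => PySem.List.slice row none (some (m.length : Int)))) "" y (k : Int))

theorem cell_eq (m : List (List String)) (i j : Nat) (hi : i < m.length) :
    pvCell m (i : Int) (j : Int) = (m.getD i []).getD j "" := by
  simp [pvCell, List.getD, List.getElem?_eq_getElem hi]

theorem rowC_length (m : List (List String)) (hpre : Pre_matrixLoop m) (i : Nat)
    (hi : i < m.length) : (rowC m i).length = m.length := by
  have hmem : m.getD i [] ∈ m := by
    rw [List.getD_eq_getElem _ _ hi]; exact List.getElem_mem hi
  have := hpre _ hmem
  simp only [rowC, List.length_take]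
  omega

theorem rowC_getD (m : List (List String)) (i j : Nat) (hi : i < m.length)
    (hj : j < m.length) : (rowC m i).getD j "" = pvCell m (i : Int) (j : Int) := by
  rw [cell_eq m i j hi]
  simp only [rowC, List.getD_eq_getElem?_getD, List.getElem?_take_of_lt hj]

theorem colC_length (m : List (List String)) (k : Nat) : (colC m k).length = m.length := by
  simp [colC, PySem.List.length_pyRange_one]

theorem idx2_eq (m : List (List String)) (y k : Nat)
    (hy : y < m.length) (hk : k < m.length) :
    pvIdx2 (m.map (fun row => PySem.List.slice row none (some (m.length : Int)))) "" (y : Int) (k : Int)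
      = pvCell m (y : Int) (k : Int) := by
  rw [cell_eq m y k hy]
  simp only [pvIdx2, PySem.List.pyGet?_natCast, List.getElem?_map,
    List.getElem?_eq_getElem hy, Option.map_some, Option.getD_some,
    PySem.List.slice_to_natCast]
  simp [List.getD_eq_getElem?_getD, List.getElem?_take_of_lt hk,
    List.getElem?_eq_getElem hy]

theorem colC_getD (m : List (List String)) (k y : Nat)
    (hk : k < m.length) (hy : y < m.length) :
    (colC m k).getD y "" = pvCell m (y : Int) (k : Int) := by
  rw [colC, List.getD_eq_getElem?_getD, PySem.List.getElem?_map_pyRange_zero _ _ _ hy,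
    Option.getD_some, idx2_eq m y k hy hk]

-- B's right-table entry in terms of sRuns of rowC
theorem idx_right (m : List (List String)) (i j : Int) (h0 : 0 ≤ i)
    (hi : i < (m.length : Int)) (hj0 : 0 ≤ j) :
    pvIdx2 ((m.map (fun row => PySem.List.slice row none (some (m.length : Int)))).map pvRuns) 0 i j
      = (sRuns (rowC m i.toNat)).getD j.toNat 0 := by
  have hi' : i.toNat < m.length := by omega
  rw [show i = ((i.toNat : Nat) : Int) by omega, show j = ((j.toNat : Nat) : Int) by omega]
  simp only [pvIdx2, PySem.List.pyGet?_natCast, List.getElem?_map,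
    List.getElem?_eq_getElem hi', Option.map_some, Option.getD_some,
    PySem.List.slice_to_natCast, pvRuns_eq]
  simp only [Int.toNat_natCast]
  rw [List.getD_eq_getElem?_getD, rowC, List.getD_eq_getElem _ _ hi']

-- B's down-table entry in terms of sRuns of colC
theorem idx_down (m : List (List String)) (i j : Int) (h0 : 0 ≤ i)
    (hi : i < (m.length : Int)) (hj0 : 0 ≤ j) (hj : j < (m.length : Int)) :
    pvIdx2 (((PySem.List.pyRange 0 (m.length : Int) 1).map (fun j =>
        (PySem.List.pyRange 0 (m.length : Int) 1).map (fun i =>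
          pvIdx2 (m.map (fun row => PySem.List.slice row none (some (m.length : Int)))) "" i j))).map pvRuns) 0 j i
      = (sRuns (colC m j.toNat)).getD i.toNat 0 := by
  have hj' : j.toNat < m.length := by omega
  rw [show i = ((i.toNat : Nat) : Int) by omega, show j = ((j.toNat : Nat) : Int) by omega]
  simp only [pvIdx2, PySem.List.pyGet?_natCast, List.getElem?_map,
    PySem.List.getElem?_map_pyRange_zero _ _ _ hj', Option.map_some, Option.getD_some,
    pvRuns_eq]
  simp only [colC, pvIdx2, PySem.List.pyGet?_natCast, Int.toNat_natCast]
  rw [List.getD_eq_getElem?_getD]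

theorem whileX_char (m : List (List String)) (hpre : Pre_matrixLoop m) (i : Nat)
    (hi : i < m.length) :
    ∀ (n : Nat) (x : Int), ((m.length : Int) - 1 - x).toNat ≤ n → 0 ≤ x →
      x < (m.length : Int) →
      pvWhileX m (m.length : Int) (i : Int) n x
        = x + (sRuns (rowC m i)).getD (x + 1).toNat 0 := by
  have hlen : (rowC m i).length = m.length := rowC_length m hpre i hi
  intro n
  induction n with
    | zero =>
      intro x hn h0 hx
      rw [pvWhileX]
      rw [sRuns_getD_out _ _ (by rw [hlen]; omega)]
      omega
    | succ n ih =>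
      intro x hn h0 hx
      by_cases hb : x < (m.length : Int) - 1
      · by_cases ht : pvCell m (i : Int) (x + 1) = "t"
        · rw [pvWhileX, if_pos ⟨hb, ht⟩, ih (x + 1) (by omega) (by omega) (by omega)]
          have hidx : (x + 1).toNat < (rowC m i).length := by omega
          have hcell : (rowC m i).getD (x + 1).toNat "" = "t" := by
            rw [rowC_getD m i (x + 1).toNat hi (by omega),
              show (((x + 1).toNat : Nat) : Int) = x + 1 by omega]
            exact ht
          have hstep := sRuns_getD (rowC m i) (x + 1).toNat hidx
          rw [hcell, if_pos rfl, show ((x + 1).toNat + 1 : Nat) = (x + 1 + 1).toNat by omega] at hstep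
          rw [hstep]; omega
        · rw [pvWhileX, if_neg (fun h => ht h.2)]
          have hidx : (x + 1).toNat < (rowC m i).length := by omega
          have hstep := sRuns_getD (rowC m i) (x + 1).toNat hidx
          rw [rowC_getD m i (x + 1).toNat hi (by omega),
            show (((x + 1).toNat : Nat) : Int) = x + 1 by omega, if_neg ht] at hstep
          rw [hstep]; omega
      · rw [pvWhileX, if_neg (fun h => absurd h.1 hb)]
        rw [sRuns_getD_out _ _ (by rw [hlen]; omega)]
        omega

theorem whileY_char (m : List (List String)) (j : Nat)
    (hj : j < m.length) :
    ∀ (n : Nat) (y : Int), ((m.length : Int) - 1 - y).toNat ≤ n → 0 ≤ y →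
      y < (m.length : Int) →
      pvWhileY m (m.length : Int) (j : Int) n y
        = y + (sRuns (colC m j)).getD (y + 1).toNat 0 := by
  have hlen : (colC m j).length = m.length := colC_length m j
  intro n
  induction n with
    | zero =>
      intro y hn h0 hy
      rw [pvWhileY]
      rw [sRuns_getD_out _ _ (by rw [hlen]; omega)]
      omega
    | succ n ih =>
      intro y hn h0 hy
      by_cases hb : y < (m.length : Int) - 1
      · by_cases ht : pvCell m (y + 1) (j : Int) = "t"
        · rw [pvWhileY, if_pos ⟨hb, ht⟩, ih (y + 1) (by omega) (by omega) (by omega)]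
          have hidx : (y + 1).toNat < (colC m j).length := by omega
          have hcell : (colC m j).getD (y + 1).toNat "" = "t" := by
            rw [colC_getD m j (y + 1).toNat hj (by omega),
              show (((y + 1).toNat : Nat) : Int) = y + 1 by omega]
            exact ht
          have hstep := sRuns_getD (colC m j) (y + 1).toNat hidx
          rw [hcell, if_pos rfl, show ((y + 1).toNat + 1 : Nat) = (y + 1 + 1).toNat by omega] at hstep
          rw [hstep]; omega
        · rw [pvWhileY, if_neg (fun h => ht h.2)]
          have hidx : (y + 1).toNat < (colC m j).length := by omega
          have hstep := sRuns_getD (colC m j) (y + 1).toNat hidx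
          rw [colC_getD m j (y + 1).toNat hj (by omega),
            show (((y + 1).toNat : Nat) : Int) = y + 1 by omega, if_neg ht] at hstep
          rw [hstep]; omega
      · rw [pvWhileY, if_neg (fun h => absurd h.1 hb)]
        rw [sRuns_getD_out _ _ (by rw [hlen]; omega)]
        omega

-- ===== VERDICT (by name: the statement is the Claim_ definition above) =====
theorem matrixLoop_spec : Claim_equal_matrixLoop := by
  intro m _ hpre
  unfold Spec_matrixLoop
  simp only [matrixLoop, matrixLoop_alt]
  apply congrArg (fun fin : Int × Int × Int => [fin.2.2, fin.2.1])
  apply foldl_inv_congr (fun st : Int × Int × Int => 0 ≤ st.1)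
  · exact le_refl 0
  · -- outer preservation (A side)
    intro st i _ hst
    refine foldl_inv (fun st : Int × Int × Int => 0 ≤ st.1) _ _ _ hst ?_
    intro st' j _ hst'
    split_ifs with h1 h2
    · exact le_trans hst' (le_of_lt h2)
    · exact hst'
    · exact hst'
  · -- outer pointwise equality
    intro st i hiMem hst
    rw [PySem.List.mem_pyRange_one] at hiMem
    obtain ⟨hi0, hiL⟩ := hiMem
    apply foldl_inv_congr (fun st : Int × Int × Int => 0 ≤ st.1) _ _ _ _ hst
    · intro st' j _ hst'
      split_ifs with h1 h2
      · exact le_trans hst' (le_of_lt h2)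
      · exact hst'
      · exact hst'
    · intro st' j hjMem hst'
      rw [PySem.List.mem_pyRange_one] at hjMem
      obtain ⟨hj0, hjL⟩ := hjMem
      rw [idx_right m i j hi0 hiL hj0, idx_down m i j hi0 hiL hj0 hjL]
      by_cases ht : pvCell m i j = "t"
      · rw [if_pos ht]
        have hx := whileX_char m hpre i.toNat (by omega)
          ((m.length : Int) - 1 - j).toNat j le_rfl hj0 (by omega)
        rw [show ((i.toNat : Nat) : Int) = i from by omega] at hx
        have hy := whileY_char m j.toNat (by omega)
          ((m.length : Int) - 1 - i).toNat i le_rfl hi0 (by omega)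
        rw [show ((j.toNat : Nat) : Int) = j from by omega] at hy
        rw [hx, hy]
        have hrlen : (rowC m i.toNat).length = m.length := rowC_length m hpre i.toNat (by omega)
        have hr := sRuns_getD (rowC m i.toNat) j.toNat (by omega)
        rw [rowC_getD m i.toNat j.toNat (by omega) (by omega),
          show ((i.toNat : Nat) : Int) = i from by omega,
          show ((j.toNat : Nat) : Int) = j from by omega, if_pos ht] at hr
        have hc := sRuns_getD (colC m j.toNat) i.toNat (by rw [colC_length]; omega)
        rw [colC_getD m j.toNat i.toNat (by omega) (by omega),
          show ((i.toNat : Nat) : Int) = i from by omega,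
          show ((j.toNat : Nat) : Int) = j from by omega, if_pos ht] at hc
        rw [show (j + 1).toNat = j.toNat + 1 from by omega,
          show (i + 1).toNat = i.toNat + 1 from by omega, hr, hc]
        have harea : (j + (sRuns (rowC m i.toNat)).getD (j.toNat + 1) 0 + 1 - j)
            * (i + (sRuns (colC m j.toNat)).getD (i.toNat + 1) 0 + 1 - i)
            = ((sRuns (rowC m i.toNat)).getD (j.toNat + 1) 0 + 1)
            * ((sRuns (colC m j.toNat)).getD (i.toNat + 1) 0 + 1) := by ring
        rw [harea]
      · rw [if_neg ht]
        have hrlen : (rowC m i.toNat).length = m.length := rowC_length m hpre i.toNat (by omega)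
        have hr := sRuns_getD (rowC m i.toNat) j.toNat (by omega)
        rw [rowC_getD m i.toNat j.toNat (by omega) (by omega),
          show ((i.toNat : Nat) : Int) = i from by omega,
          show ((j.toNat : Nat) : Int) = j from by omega, if_neg ht] at hr
        rw [hr, zero_mul, if_neg (by omega)]
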